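-- pv_equiv track=rewrite | github.com/pm4py/pm4py-core | pm4py/algo/inductive/versions/dfg_only.py | checkParallelCutCouple
-- ===== SOURCE A (Python) =====
-- def checkParallelCutCouple(firstNegatedComponent, secondNegatedComponent, origPairs):
--     """
--     Check parallel cut couple
--
--     Parameters
--     ----------
--     firstNegatedComponent
--         First negated component
--     secondNegatedComponent
--         Second negated component
--     originalPairs
--         Original pairs of activities
--     """
--     z = 0
--     while z < len(firstNegatedComponent):
--         k = 0
--         while k < len(secondNegatedComponent):
--             pair1ToCheck = (firstNegatedComponent[z], secondNegatedComponent[k])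
--             pair1CheckResult = pair1ToCheck in origPairs
--             pair2ToCheck = (secondNegatedComponent[k], firstNegatedComponent[z])
--             pair2CheckResult = pair2ToCheck in origPairs
--             pairCheckResult = (pair1CheckResult and pair2CheckResult)
--             if not pairCheckResult:
--                 return False
--             else:
--                 pass
--             k = k + 1
--         z = z + 1
--     return True
-- ===== SOURCE B (Python) =====
-- def checkParallelCutCouple(firstNegatedComponent, secondNegatedComponent, origPairs):
--     origSet = set(origPairs)
--     both = {}
--     for (x, y) in origSet:
--         if (y, x) in origSet:
--             both.setdefault(x, set()).add(y)
--     neededTargets = set(secondNegatedComponent)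
--     return all(neededTargets <= both.get(a, set()) for a in firstNegatedComponent)
-- ===== Notes on version B (the rewrite author's own statement) =====
-- stated objective: alternative
-- what changed: Replaces the index-driven nested while loops scanning origPairs with a one-pass symmetric-neighbour index (a dict of sets built from set(origPairs)) followed by subset tests; it trades A's per-pair list scans for an index built once.
import Mathlib
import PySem

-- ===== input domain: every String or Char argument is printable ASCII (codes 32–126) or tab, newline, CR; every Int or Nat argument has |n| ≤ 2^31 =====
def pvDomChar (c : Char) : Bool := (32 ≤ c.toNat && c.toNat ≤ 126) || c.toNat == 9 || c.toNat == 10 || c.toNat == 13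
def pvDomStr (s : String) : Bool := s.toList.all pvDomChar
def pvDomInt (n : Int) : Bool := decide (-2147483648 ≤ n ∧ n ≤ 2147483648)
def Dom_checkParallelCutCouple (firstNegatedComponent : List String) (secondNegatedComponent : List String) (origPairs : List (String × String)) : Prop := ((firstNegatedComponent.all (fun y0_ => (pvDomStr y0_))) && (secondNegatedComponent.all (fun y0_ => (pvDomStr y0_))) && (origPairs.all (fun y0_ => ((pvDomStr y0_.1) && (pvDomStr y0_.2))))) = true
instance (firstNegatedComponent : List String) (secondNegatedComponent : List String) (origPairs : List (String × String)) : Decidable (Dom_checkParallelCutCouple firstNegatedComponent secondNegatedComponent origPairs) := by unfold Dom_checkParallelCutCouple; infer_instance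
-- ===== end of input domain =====

-- B replaces A's nested index loops scanning origPairs with a one-pass symmetric-neighbour index over set(origPairs) plus subset tests (return value equivalence proved below).


-- ===== PORT A =====
-- inner while loop over secondNegatedComponent (structural recursion over the list A indexes with k)
def pvCheckInnerA (x : String) (second : List String) (origPairs : List (String × String)) : Bool :=
  match second with
  | [] => true
  | y :: rest =>
    let pair1CheckResult := origPairs.contains (x, y)
    let pair2CheckResult := origPairs.contains (y, x)
    let pairCheckResult := pair1CheckResult && pair2CheckResult
    if !pairCheckResult then false
    else pvCheckInnerA x rest origPairs

def checkParallelCutCouple (firstNegatedComponent : List String) (secondNegatedComponent : List String) (origPairs : List (String × String)) : Bool :=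
  match firstNegatedComponent with
  | [] => true
  | x :: rest =>
    if pvCheckInnerA x secondNegatedComponent origPairs = false then false
    else checkParallelCutCouple rest secondNegatedComponent origPairs

-- ===== PORT B =====
def checkParallelCutCouple_alt (firstNegatedComponent : List String) (secondNegatedComponent : List String) (origPairs : List (String × String)) : Bool :=
  let origSet : PySem.Set (String × String) := PySem.Set.ofList origPairs
  let both : PySem.Dict String (PySem.Set String) :=
    origSet.foldl (fun d p =>
      if origSet.contains (p.2, p.1) then
        PySem.Dict.modify d p.1 PySem.Set.empty (fun t => PySem.Set.add t p.2)
      else d) PySem.Dict.empty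
  let neededTargets : PySem.Set String := PySem.Set.ofList secondNegatedComponent
  firstNegatedComponent.all (fun a =>
    PySem.Set.issubset neededTargets (PySem.Dict.getD both a PySem.Set.empty))

-- ===== PRECONDITION & SPEC =====

def Spec_checkParallelCutCouple (firstNegatedComponent : List String) (secondNegatedComponent : List String) (origPairs : List (String × String)) (out : Bool) : Prop := out = checkParallelCutCouple_alt firstNegatedComponent secondNegatedComponent origPairs
instance (firstNegatedComponent : List String) (secondNegatedComponent : List String) (origPairs : List (String × String)) (out : Bool) : Decidable (Spec_checkParallelCutCouple firstNegatedComponent secondNegatedComponent origPairs out) := by unfold Spec_checkParallelCutCouple; infer_instance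

-- ===== CLAIM (what is proved, stated in full; the proofs are below) =====
def Claim_equal_checkParallelCutCouple : Prop := ∀ (firstNegatedComponent : List String) (secondNegatedComponent : List String) (origPairs : List (String × String)), Dom_checkParallelCutCouple firstNegatedComponent secondNegatedComponent origPairs → Spec_checkParallelCutCouple firstNegatedComponent secondNegatedComponent origPairs (checkParallelCutCouple firstNegatedComponent secondNegatedComponent origPairs)

-- ===== LEMMAS AND PROOFS =====

lemma pvA_inner_iff (x : String) (s : List String) (o : List (String × String)) :
    pvCheckInnerA x s o = true ↔ ∀ b ∈ s, (x, b) ∈ o ∧ (b, x) ∈ o := by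
  induction s with
  | nil => simp [pvCheckInnerA]
  | cons y rest ih =>
    simp only [pvCheckInnerA, List.mem_cons]
    by_cases h1 : (x, y) ∈ o <;> by_cases h2 : (y, x) ∈ o <;>
      simp [h1, h2, ih]

lemma pvA_iff (f s : List String) (o : List (String × String)) :
    checkParallelCutCouple f s o = true ↔ ∀ a ∈ f, ∀ b ∈ s, (a, b) ∈ o ∧ (b, a) ∈ o := by
  induction f with
  | nil => simp [checkParallelCutCouple]
  | cons x rest ih =>
    simp only [checkParallelCutCouple, List.mem_cons]
    by_cases h : pvCheckInnerA x s o = true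
    · have := (pvA_inner_iff x s o).mp h
      simp [h, ih]
      exact fun _ => this
    · have hf : pvCheckInnerA x s o = false := by revert h; cases pvCheckInnerA x s o <;> simp
      simp [hf]
      intro hall
      exact absurd ((pvA_inner_iff x s o).mpr hall) h

lemma pvMem_both (oset : PySem.Set (String × String)) (l : List (String × String))
    (d : PySem.Dict String (PySem.Set String)) (a x : String) :
    x ∈ PySem.Dict.getD
      (l.foldl (fun d p =>
        if oset.contains (p.2, p.1) then
          PySem.Dict.modify d p.1 PySem.Set.empty (fun t => PySem.Set.add t p.2)
        else d) d) a PySem.Set.empty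
    ↔ x ∈ PySem.Dict.getD d a PySem.Set.empty ∨ ((a, x) ∈ l ∧ (x, a) ∈ oset) := by
  induction l generalizing d with
  | nil => simp
  | cons p l ih =>
    obtain ⟨px, py⟩ := p
    simp only [List.foldl_cons, ih, List.mem_cons]
    by_cases hc : (py, px) ∈ oset
    · have hc' : oset.contains (py, px) = true := by simpa using hc
      simp only [hc', if_true]
      rw [PySem.Dict.getD_modify]
      by_cases ha : a = px
      · subst ha
        simp only [if_true, PySem.Set.mem_add, Prod.mk.injEq]
        constructor
        · rintro ((h | h) | h)
          · exact Or.inl h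
          · subst h; exact Or.inr ⟨Or.inl ⟨trivial, rfl⟩, hc⟩
          · exact Or.inr ⟨Or.inr h.1, h.2⟩
        · rintro (h | ⟨(⟨_, h⟩ | h), h2⟩)
          · exact Or.inl (Or.inl h)
          · subst h; exact Or.inl (Or.inr rfl)
          · exact Or.inr ⟨h, h2⟩
      · simp only [if_neg ha, Prod.mk.injEq]
        constructor
        · rintro (h | h)
          · exact Or.inl h
          · exact Or.inr ⟨Or.inr h.1, h.2⟩
        · rintro (h | ⟨(⟨h1, _⟩ | h), h2⟩)
          · exact Or.inl h
          · exact absurd h1 ha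
          · exact Or.inr ⟨h, h2⟩
    · have hc' : oset.contains (py, px) = false := by simpa using hc
      simp only [hc', Bool.false_eq_true, if_false, Prod.mk.injEq]
      constructor
      · rintro (h | h)
        · exact Or.inl h
        · exact Or.inr ⟨Or.inr h.1, h.2⟩
      · rintro (h | ⟨(⟨h1, h2⟩ | h), h2'⟩)
        · exact Or.inl h
        · subst h1; subst h2; exact absurd h2' hc
        · exact Or.inr ⟨h, h2'⟩

lemma pvB_iff (f s : List String) (o : List (String × String)) :
    checkParallelCutCouple_alt f s o = true ↔ ∀ a ∈ f, ∀ b ∈ s, (a, b) ∈ o ∧ (b, a) ∈ o := by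
  unfold checkParallelCutCouple_alt
  simp only [List.all_eq_true, PySem.Set.issubset_iff]
  constructor
  · intro h a ha b hb
    have hx := h a ha b ((PySem.Set.mem_ofList _ _).mpr hb)
    rw [pvMem_both] at hx
    rcases hx with hx | hx
    · simp at hx
    · exact ⟨(PySem.Set.mem_ofList _ _).mp hx.1, (PySem.Set.mem_ofList _ _).mp hx.2⟩
  · intro h a ha b hb
    have hb' := (PySem.Set.mem_ofList _ _).mp hb
    rw [pvMem_both]
    exact Or.inr ⟨(PySem.Set.mem_ofList _ _).mpr (h a ha b hb').1,
      (PySem.Set.mem_ofList _ _).mpr (h a ha b hb').2⟩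

-- ===== VERDICT (by name: the statement is the Claim_ definition above) =====
theorem checkParallelCutCouple_spec : Claim_equal_checkParallelCutCouple := by
  intro f s o _
  unfold Spec_checkParallelCutCouple
  have := (pvA_iff f s o).trans (pvB_iff f s o).symm
  revert this
  cases checkParallelCutCouple f s o <;> cases checkParallelCutCouple_alt f s o <;> simp
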